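-- pv_equiv track=rewrite | github.com/Allegheny-Computer-Science-280-F2017/cs280-F2017-lab3-starter | generator/generator.py | generate
-- ===== SOURCE A (Python) =====
-- def generate(starting_list):
--     """ Assumes that starting_list is a list.
--         Generates a list_of_lists according to specification. """
--     list_of_lists = []
--     for first_item in starting_list:
--         for second_item in starting_list:
--             cloned_list = starting_list[:]
--             first_item_index = cloned_list.index(first_item)
--             second_item_index = cloned_list.index(second_item)
--             cloned_list[second_item_index], cloned_list[
--                 first_item_index] = cloned_list[first_item_index], cloned_list[
--                     second_item_index]
--             if cloned_list not in list_of_lists: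
--                 list_of_lists.append(cloned_list)
--     return list_of_lists
-- ===== SOURCE B (Python) =====
-- def generate(starting_list):
--     """ Assumes that starting_list is a list.
--         Generates a list_of_lists according to specification. """
--     if not starting_list:
--         return []
--     seen = []
--     for x in starting_list:
--         if x not in seen:
--             seen.append(x)
--     idxs = [starting_list.index(v) for v in seen]
--     result = [starting_list[:]]
--     for a in range(len(idxs)):
--         for b in range(a + 1, len(idxs)):
--             i, j = idxs[a], idxs[b]
--             clone = starting_list[:]
--             clone[i], clone[j] = clone[j], clone[i]
--             result.append(clone)
--     return result
-- ===== Notes on version B (the rewrite author's own statement) =====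
-- stated objective: faster
-- what changed: Instead of generating all n*n ordered value pairs and filtering duplicates with a 'not in' scan over the growing result, B collects the distinct values in first-occurrence order, takes their first indices, and emits the original list plus one swapped clone per index pair (i<j) directly, with no membership test.
import Mathlib
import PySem

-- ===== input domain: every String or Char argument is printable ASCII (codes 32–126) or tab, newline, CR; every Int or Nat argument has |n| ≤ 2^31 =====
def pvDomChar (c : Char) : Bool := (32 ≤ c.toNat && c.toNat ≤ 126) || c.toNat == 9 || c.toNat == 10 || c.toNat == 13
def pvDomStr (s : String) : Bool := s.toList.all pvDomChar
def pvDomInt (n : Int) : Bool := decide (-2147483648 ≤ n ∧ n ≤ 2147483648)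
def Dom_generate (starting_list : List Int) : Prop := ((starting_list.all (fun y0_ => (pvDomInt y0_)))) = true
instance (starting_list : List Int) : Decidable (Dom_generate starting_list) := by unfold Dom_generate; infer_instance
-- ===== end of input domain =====

-- B replaces A's quadratic generate-and-deduplicate (every ordered value pair, `not in` filter) by a direct
-- triangular enumeration over the first-occurrence indices of the distinct values (objective: faster, no
-- membership scan over the growing result).

-- ===== PORT A =====
-- `.index(item)` always succeeds here (the item is drawn from the list itself), so the `.getD 0` default is unreachable.
def generate (starting_list : List Int) : List (List Int) :=
  starting_list.foldl (fun list_of_lists first_item =>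
    starting_list.foldl (fun list_of_lists second_item =>
      let cloned_list := starting_list
      let first_item_index : Nat := (PySem.List.index? cloned_list first_item).getD 0
      let second_item_index : Nat := (PySem.List.index? cloned_list second_item).getD 0
      let tmp1 := PySem.List.pyGetD cloned_list (first_item_index : Int) 0
      let tmp2 := PySem.List.pyGetD cloned_list (second_item_index : Int) 0
      let cloned_list := PySem.List.pySetD (PySem.List.pySetD cloned_list (second_item_index : Int) tmp1) (first_item_index : Int) tmp2
      if cloned_list ∈ list_of_lists then list_of_lists else list_of_lists ++ [cloned_list])
    list_of_lists) []

-- ===== PORT B =====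
def generate_alt (starting_list : List Int) : List (List Int) :=
  if starting_list = [] then []
  else
    let seen := starting_list.foldl (fun seen x => if x ∈ seen then seen else seen ++ [x]) ([] : List Int)
    let idxs := seen.map (fun v => (PySem.List.index? starting_list v).getD 0)
    let result := [starting_list]
    (PySem.List.pyRange 0 (PySem.List.len idxs) 1).foldl (fun result a =>
      (PySem.List.pyRange (a + 1) (PySem.List.len idxs) 1).foldl (fun result b =>
        let i : Nat := PySem.List.pyGetD idxs a 0
        let j : Nat := PySem.List.pyGetD idxs b 0
        let clone := starting_list
        let clone := PySem.List.pySetD (PySem.List.pySetD clone (i : Int) (PySem.List.pyGetD clone (j : Int) 0)) (j : Int) (PySem.List.pyGetD clone (i : Int) 0)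
        result ++ [clone]) result) result

-- ===== PRECONDITION & SPEC =====
def Spec_generate (starting_list : List Int) (out : List (List Int)) : Prop := out = generate_alt starting_list
instance (starting_list : List Int) (out : List (List Int)) : Decidable (Spec_generate starting_list out) := by unfold Spec_generate; infer_instance

-- ===== CLAIM (what is proved, stated in full; the proofs are below) =====
def Claim_equal_generate : Prop := ∀ (starting_list : List Int), Dom_generate starting_list → Spec_generate starting_list (generate starting_list)

-- ===== LEMMAS AND PROOFS =====

/-- The deduplicating append step shared by A's `not in`-guarded append and B's `seen` loop. -/
def dd {α : Type} [DecidableEq α] (acc : List α) (x : α) : List α := if x ∈ acc then acc else acc ++ [x]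

/-- The swap A performs: positions `j` then `i` receive the old values at `i` resp. `j`. -/
def swp (l : List Int) (i j : Nat) : List Int := (l.set j (l.getD i 0)).set i (l.getD j 0)

/-- First index of a value (total form of `.index`). -/
def fidx (l : List Int) (v : Int) : Nat := (PySem.List.index? l v).getD 0

/-- Strict upper triangle of swaps over a list of indices. -/
def tsuf (l : List Int) : List Nat → List (List Int)
  | [] => []
  | i :: r => r.map (swp l i) ++ tsuf l r

/-- Rows of the triangle contributed by a processed prefix `p`, with remaining indices `q`. -/
def rows (l : List Int) : List Nat → List Nat → List (List Int)
  | [], _ => []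
  | i :: p, q => (p ++ q).map (swp l i) ++ rows l p q

/-- The elements of `l` that are new relative to an already-seen list `s`, in order. -/
def filterNew {α : Type} [DecidableEq α] : List α → List α → List α
  | _, [] => []
  | s, a :: r => if a ∈ s then filterNew s r else a :: filterNew (s ++ [a]) r

-- ---- generic facts about the dedup fold ----

theorem dd_foldl_eq_append_filterNew {α : Type} [DecidableEq α] (l s : List α) :
    List.foldl dd s l = s ++ filterNew s l := by
  induction l generalizing s with
  | nil => simp [filterNew]
  | cons a r ih =>
    by_cases h : a ∈ s <;> simp [filterNew, dd, h, ih, List.append_assoc]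

theorem dedup_eq_dd_foldl (l : List Int) :
    PySem.List.dedup l = List.foldl dd [] l := by
  rw [PySem.List.dedup, PySem.Set.ofList]
  apply PySem.List.foldl_congr_mem
  intro acc x _
  simp [PySem.Set.add, dd]

theorem dd_mono {α : Type} [DecidableEq α] (m : List α) (acc : List α) (x : α) (hx : x ∈ acc) :
    x ∈ List.foldl dd acc m := by
  induction m generalizing acc with
  | nil => exact hx
  | cons a r ih =>
    refine ih _ ?_
    by_cases h : a ∈ acc <;> simp [dd, h, hx]

theorem dd_all_mem {α : Type} [DecidableEq α] (m : List α) (acc : List α) (x : α) (hx : x ∈ m) :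
    x ∈ List.foldl dd acc m := by
  induction m generalizing acc with
  | nil => cases hx
  | cons a r ih =>
    rcases List.mem_cons.mp hx with rfl | hx'
    · rw [List.foldl_cons]
      apply dd_mono
      by_cases h : x ∈ acc <;> simp [dd, h]
    · exact ih _ hx'

theorem dd_skip_all {α : Type} [DecidableEq α] (m : List α) (acc : List α)
    (h : ∀ x ∈ m, x ∈ acc) : List.foldl dd acc m = acc := by
  induction m with
  | nil => rfl
  | cons a r ih =>
    have ha : a ∈ acc := h a (by simp)
    simp only [List.foldl_cons, dd, ha, if_pos]
    exact ih (fun x hx => h x (by simp [hx]))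

theorem dd_fresh {α : Type} [DecidableEq α] (m : List α) (acc : List α)
    (hn : m.Nodup) (h : ∀ x ∈ m, x ∉ acc) : List.foldl dd acc m = acc ++ m := by
  induction m generalizing acc with
  | nil => simp
  | cons a r ih =>
    have ha : a ∉ acc := h a (by simp)
    simp only [List.foldl_cons, dd, ha, if_false]
    rw [ih (acc ++ [a]) hn.of_cons]
    · simp [List.append_assoc]
    · intro x hx
      simp only [List.mem_append, List.mem_singleton]
      rintro (hx' | rfl)
      · exact h x (by simp [hx]) hx'
      · exact (List.nodup_cons.mp hn).1 hx

theorem dd_flatMap_filterNew {α β : Type} [DecidableEq α] (g : β → List α) [DecidableEq β]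
    (l : List β) : ∀ (s : List β) (acc : List α),
    (∀ a ∈ s, ∀ x ∈ g a, x ∈ acc) →
    List.foldl dd acc (l.flatMap g) = List.foldl dd acc ((filterNew s l).flatMap g) := by
  induction l with
  | nil => intros; rfl
  | cons a r ih =>
    intro s acc hs
    by_cases h : a ∈ s
    · simp only [filterNew, h, if_pos, List.flatMap_cons, List.foldl_append]
      rw [dd_skip_all _ _ (hs a h)]
      exact ih s acc hs
    · simp only [filterNew, h, if_false, List.flatMap_cons, List.foldl_append]
      apply ih
      intro a' ha' x hx
      rcases List.mem_append.mp ha' with ha'' | ha''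
      · exact dd_mono _ _ _ (hs a' ha'' x hx)
      · rw [List.mem_singleton] at ha''
        subst ha''
        exact dd_all_mem _ _ _ hx

theorem dd_foldl_flatMap_congr {α β : Type} [DecidableEq α] (g₁ g₂ : β → List α)
    (h : ∀ a acc, List.foldl dd acc (g₁ a) = List.foldl dd acc (g₂ a)) (m : List β) :
    ∀ acc, List.foldl dd acc (m.flatMap g₁) = List.foldl dd acc (m.flatMap g₂) := by
  induction m with
  | nil => intro acc; rfl
  | cons a r ih =>
    intro acc
    simp only [List.flatMap_cons, List.foldl_append, h a acc, ih]

-- ---- facts about fidx and swp ----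

theorem fidx_spec (l : List Int) (v : Int) (hv : v ∈ l) :
    fidx l v < l.length ∧ l.getD (fidx l v) 0 = v := by
  have h1 : (PySem.List.index? l v).isSome := (PySem.List.index?_isSome_iff l v).mpr hv
  obtain ⟨k, hk⟩ := Option.isSome_iff_exists.mp h1
  obtain ⟨hlt, hget, -⟩ := PySem.List.getElem_of_index?_eq_some hk
  rw [fidx, hk, Option.getD_some]
  exact ⟨hlt, by rw [List.getD_eq_getElem _ _ hlt, hget]⟩

theorem swp_self (l : List Int) (i : Nat) (hi : i < l.length) : swp l i i = l := by
  rw [swp, List.set_set, List.getD_eq_getElem _ _ hi, List.set_getElem_self]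

theorem swp_comm (l : List Int) (i j : Nat) : swp l i j = swp l j i := by
  by_cases h : i = j
  · rw [h]
  · rw [swp, swp, List.set_comm _ _ h]

theorem getD_swp (l : List Int) (i j t : Nat) (hi : i < l.length) (hj : j < l.length) :
    (swp l i j).getD t 0 = if i = t then l.getD j 0 else if j = t then l.getD i 0 else l.getD t 0 := by
  simp only [swp, List.getD, List.getElem?_set, List.length_set]
  by_cases h1 : i = t
  · subst h1
    by_cases h2 : j = i <;> simp [h2, hi, hj]
  · by_cases h2 : j = t
    · subst h2
      simp [h1, hi, hj]
    · simp [h1, h2]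

theorem swp_ne_orig (l : List Int) (i j : Nat) (hi : i < l.length) (hj : j < l.length)
    (hv : l.getD i 0 ≠ l.getD j 0) : swp l i j ≠ l := by
  intro he
  have h : (swp l i j).getD i 0 = l.getD i 0 := congrArg (fun x => x.getD i 0) he
  rw [getD_swp l i j i hi hj, if_pos rfl] at h
  exact hv h.symm

theorem swp_inj (l : List Int) (i j a b : Nat)
    (hi : i < l.length) (hj : j < l.length) (ha : a < l.length) (hb : b < l.length)
    (hij : i ≠ j) (hdij : l.getD i 0 ≠ l.getD j 0)
    (he : swp l i j = swp l a b) :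
    (i = a ∧ j = b) ∨ (i = b ∧ j = a) := by
  have gi : (swp l i j).getD i 0 = (swp l a b).getD i 0 := congrArg (fun x => x.getD i 0) he
  have gj : (swp l i j).getD j 0 = (swp l a b).getD j 0 := congrArg (fun x => x.getD j 0) he
  rw [getD_swp l i j i hi hj, getD_swp l a b i ha hb, if_pos rfl] at gi
  rw [getD_swp l i j j hi hj, getD_swp l a b j ha hb, if_neg hij, if_pos rfl] at gj
  by_cases hai : a = i
  · refine Or.inl ⟨hai.symm, ?_⟩
    rw [if_neg (hai ▸ hij : a ≠ j)] at gj
    by_cases hbj : b = j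
    · exact hbj.symm
    · rw [if_neg hbj] at gj
      exact absurd gj hdij
  · by_cases hbi : b = i
    · refine Or.inr ⟨hbi.symm, ?_⟩
      by_cases haj : a = j
      · exact haj.symm
      · rw [if_neg haj, if_neg (hbi ▸ hij : b ≠ j)] at gj
        exact absurd gj hdij
    · rw [if_neg hai, if_neg hbi] at gi
      exact absurd gi.symm hdij

-- ---- facts about rows / tsuf ----

theorem rows_nil (l : List Int) (p : List Nat) : rows l p [] = tsuf l p := by
  induction p with
  | nil => rfl
  | cons i p' ih => simp [rows, tsuf, ih]

theorem rows_snoc (l : List Int) (p : List Nat) (i : Nat) (q : List Nat) :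
    rows l (p ++ [i]) q = rows l p (i :: q) ++ q.map (swp l i) := by
  induction p with
  | nil => simp [rows]
  | cons a p' ih => simp [rows, ih, List.append_assoc]

theorem mem_rows_of (l : List Int) (p q : List Nat) (k b : Nat) (hk : k ∈ p) (hb : b ∈ q) :
    swp l k b ∈ rows l p q := by
  induction p with
  | nil => cases hk
  | cons a p' ih =>
    rcases List.mem_cons.mp hk with rfl | hk'
    · exact List.mem_append.mpr (Or.inl (List.mem_map_of_mem (List.mem_append.mpr (Or.inr hb))))
    · exact List.mem_append.mpr (Or.inr (ih hk'))

theorem mem_rows_elim (l : List Int) (p q : List Nat) (x : List Int)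
    (hn : (p ++ q).Nodup) (hx : x ∈ rows l p q) :
    ∃ a b, a ∈ p ∧ b ∈ p ++ q ∧ a ≠ b ∧ x = swp l a b := by
  induction p with
  | nil => cases hx
  | cons c p' ih =>
    rcases List.mem_append.mp hx with hx' | hx'
    · rcases List.mem_map.mp hx' with ⟨b, hb, rfl⟩
      refine ⟨c, b, by simp, by simp [List.mem_append.mp hb], ?_, rfl⟩
      rintro rfl
      exact (List.nodup_cons.mp (by simpa using hn)).1 hb
    · obtain ⟨a, b, ha, hb, hab, rfl⟩ := ih (by simpa using (List.nodup_cons.mp (by simpa using hn)).2) hx'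
      exact ⟨a, b, by simp [ha], by simp [List.mem_append.mp hb], hab, rfl⟩

-- ---- the main block-by-block characterisation of A's fold ----

theorem main_blocks (l : List Int) (ks0 : List Nat)
    (hb : ∀ k ∈ ks0, k < l.length)
    (hv : ∀ k ∈ ks0, ∀ k' ∈ ks0, k ≠ k' → l.getD k 0 ≠ l.getD k' 0)
    (hn : ks0.Nodup) :
    ∀ (q p : List Nat), p ++ q = ks0 →
      List.foldl dd (l :: rows l p q) (q.flatMap (fun i => ks0.map (swp l i))) = l :: tsuf l ks0 := by
  intro q
  induction q with
  | nil =>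
    intro p hp
    rw [List.append_nil] at hp
    subst hp
    simp [rows_nil]
  | cons i q' ih =>
    intro p hp
    have hiks : i ∈ ks0 := by rw [← hp]; simp
    have hilen := hb i hiks
    have hnd := hn
    rw [← hp] at hnd
    obtain ⟨hpn, hcn, hdisj⟩ := List.nodup_append.mp hnd
    have hiq' : i ∉ q' := (List.nodup_cons.mp hcn).1
    have hq'n : q'.Nodup := (List.nodup_cons.mp hcn).2
    rw [List.flatMap_cons, List.foldl_append]
    have hsplit : ks0.map (swp l i) = p.map (swp l i) ++ (swp l i i :: q'.map (swp l i)) := by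
      rw [← hp]; simp
    have hskip : ∀ x ∈ p.map (swp l i), x ∈ l :: rows l p (i :: q') := by
      intro x hx
      obtain ⟨k, hk, rfl⟩ := List.mem_map.mp hx
      rw [swp_comm]
      exact List.mem_cons.mpr (Or.inr (mem_rows_of l p (i :: q') k i hk (by simp)))
    have hmem : ∀ k ∈ q', k ∈ ks0 := by
      intro k hk; rw [← hp]; simp [hk]
    have hne : ∀ k ∈ q', i ≠ k := fun k hk h => hiq' (h ▸ hk)
    have hfresh : ∀ x ∈ q'.map (swp l i), x ∉ l :: rows l p (i :: q') := by
      intro x hx hmem'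
      obtain ⟨k, hk, rfl⟩ := List.mem_map.mp hx
      have hklen := hb k (hmem k hk)
      have hvik : l.getD i 0 ≠ l.getD k 0 := hv i hiks k (hmem k hk) (hne k hk)
      rcases List.mem_cons.mp hmem' with h | h
      · exact swp_ne_orig l i k hilen hklen hvik h
      · obtain ⟨a, b, hap, hbpq, hab, heq⟩ := mem_rows_elim l p (i :: q') (swp l i k) (hp ▸ hnd) h
        have haks : a ∈ ks0 := by rw [← hp]; simp [hap]
        have hbks : b ∈ ks0 := by rw [← hp]; rcases List.mem_append.mp hbpq with h' | h' <;> simp [h']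
        rcases swp_inj l i k a b hilen hklen (hb a haks) (hb b hbks) (hne k hk) hvik heq with
          ⟨rfl, rfl⟩ | ⟨rfl, rfl⟩
        · exact hdisj i hap i (by simp) rfl
        · exact hdisj k hap k (by simp [hk]) rfl
    have hnodup : (q'.map (swp l i)).Nodup := by
      refine List.Nodup.map_on ?_ hq'n
      intro k hk k' hk' heq
      have hvik : l.getD i 0 ≠ l.getD k 0 := hv i hiks k (hmem k hk) (hne k hk)
      rcases swp_inj l i k i k' hilen (hb k (hmem k hk)) hilen (hb k' (hmem k' hk'))
        (hne k hk) hvik heq with ⟨-, h⟩ | ⟨h1, h2⟩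
      · exact h
      · exact h2.trans h1
    have hblock : List.foldl dd (l :: rows l p (i :: q')) (ks0.map (swp l i)) = l :: rows l (p ++ [i]) q' :=
      calc List.foldl dd (l :: rows l p (i :: q')) (ks0.map (swp l i))
        = List.foldl dd (l :: rows l p (i :: q')) (p.map (swp l i) ++ (swp l i i :: q'.map (swp l i))) := by rw [hsplit]
      _ = List.foldl dd (l :: rows l p (i :: q')) (swp l i i :: q'.map (swp l i)) := by
            rw [List.foldl_append, dd_skip_all _ _ hskip]
      _ = List.foldl dd (l :: rows l p (i :: q')) (q'.map (swp l i)) := by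
            rw [List.foldl_cons, swp_self l i hilen]
            congr 1
            simp [dd]
      _ = l :: rows l (p ++ [i]) q' := by
            rw [dd_fresh _ _ hnodup hfresh, rows_snoc]
            simp
    rw [hblock]
    exact ih (p ++ [i]) (by simpa using hp)

-- ---- normal forms of the two ports ----

theorem generate_eq_dd (l : List Int) :
    generate l = List.foldl dd []
      (l.flatMap (fun a => l.map (fun b => swp l (fidx l a) (fidx l b)))) := by
  rw [generate, List.foldl_flatMap]
  apply PySem.List.foldl_congr_mem
  intro acc a _
  rw [List.foldl_map]
  apply PySem.List.foldl_congr_mem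
  intro acc' b _
  simp only [PySem.List.pyGetD_natCast, PySem.List.pySetD_natCast]
  simp [dd, swp, fidx]

theorem swB_eq_swp (l : List Int) (i j : Nat) :
    (l.set i (l.getD j 0)).set j (l.getD i 0) = swp l i j := by
  by_cases h : i = j
  · subst h; rfl
  · rw [swp, List.set_comm _ _ h]

theorem range_tri (l : List Int) (idxs : List Nat) :
    ∀ (n k : Nat), idxs.length - k = n → k ≤ idxs.length → ∀ (res : List (List Int)),
      (PySem.List.pyRange (k : Int) ((idxs.length : Int)) 1).foldl
        (fun res a =>
          (PySem.List.pyRange (a + 1) ((idxs.length : Int)) 1).foldl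
            (fun res b => res ++ [swp l (PySem.List.pyGetD idxs a 0) (PySem.List.pyGetD idxs b 0)]) res) res
      = res ++ tsuf l (idxs.drop k) := by
  intro n
  induction n with
  | zero =>
    intro k hk hk' res
    have hk2 : k = idxs.length := by omega
    subst hk2
    rw [PySem.List.pyRange_one_eq_nil (by omega), List.drop_length]
    simp [tsuf]
  | succ n ih =>
    intro k hk hk' res
    have hklt : k < idxs.length := by omega
    rw [PySem.List.pyRange_one_cons (by exact_mod_cast hklt), List.foldl_cons]
    rw [PySem.List.foldl_append_singleton_eq_map]
    have hcast : (k : Int) + 1 = ((k + 1 : Nat) : Int) := by push_cast; ring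
    rw [hcast]
    rw [show (fun b => swp l (PySem.List.pyGetD idxs (k : Int) 0) (PySem.List.pyGetD idxs b 0))
        = (fun b => swp l (PySem.List.pyGetD idxs (k : Int) 0) b) ∘ (fun b => PySem.List.pyGetD idxs b 0) from rfl]
    rw [← List.map_map, PySem.List.map_pyGetD_pyRange' idxs 0 (a := ((k + 1 : Nat) : Int)) (by positivity)]
    rw [ih (k + 1) (by omega) (by omega)]
    have hdk : idxs.drop k = idxs[k] :: idxs.drop (k + 1) := List.drop_eq_getElem_cons hklt
    rw [hdk, tsuf]
    simp [PySem.List.pyGetD_natCast, List.getD, List.getElem?_eq_getElem hklt]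

theorem generate_alt_eq (l : List Int) :
    generate_alt l = if l = [] then []
      else l :: tsuf l ((PySem.List.dedup l).map (fidx l)) := by
  by_cases hl : l = []
  · simp [generate_alt, hl]
  · simp only [generate_alt, if_neg hl]
    have hseen : List.foldl (fun seen x => if x ∈ seen then seen else seen ++ [x]) ([] : List Int) l
        = PySem.List.dedup l := (dedup_eq_dd_foldl l).symm
    rw [hseen]
    have hmap : (PySem.List.dedup l).map (fun v => (PySem.List.index? l v).getD 0)
        = (PySem.List.dedup l).map (fidx l) := rfl
    rw [hmap]
    set idxs := (PySem.List.dedup l).map (fidx l) with hidxs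
    have hbody : ∀ (res : List (List Int)) (a : Int),
        (PySem.List.pyRange (a + 1) (PySem.List.len idxs) 1).foldl
          (fun res b =>
            res ++ [PySem.List.pySetD (PySem.List.pySetD l ((PySem.List.pyGetD idxs a 0 : Nat) : Int)
              (PySem.List.pyGetD l ((PySem.List.pyGetD idxs b 0 : Nat) : Int) 0)) ((PySem.List.pyGetD idxs b 0 : Nat) : Int)
              (PySem.List.pyGetD l ((PySem.List.pyGetD idxs a 0 : Nat) : Int) 0)]) res
        = (PySem.List.pyRange (a + 1) ((idxs.length : Int)) 1).foldl
            (fun res b => res ++ [swp l (PySem.List.pyGetD idxs a 0) (PySem.List.pyGetD idxs b 0)]) res := by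
      intro res a
      rw [PySem.List.len_eq]
      apply PySem.List.foldl_congr_mem
      intro acc b _
      simp only [PySem.List.pyGetD_natCast, PySem.List.pySetD_natCast, swB_eq_swp]
    calc (PySem.List.pyRange 0 (PySem.List.len idxs) 1).foldl _ [l]
        = (PySem.List.pyRange 0 ((idxs.length : Int)) 1).foldl
            (fun res a =>
              (PySem.List.pyRange (a + 1) ((idxs.length : Int)) 1).foldl
                (fun res b => res ++ [swp l (PySem.List.pyGetD idxs a 0) (PySem.List.pyGetD idxs b 0)]) res) [l] := by
          simp only [PySem.List.len_eq]
          exact PySem.List.foldl_congr_mem _ _ _ _ (fun acc a _ => hbody acc a)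
      _ = [l] ++ tsuf l (idxs.drop 0) := by exact_mod_cast range_tri l idxs (idxs.length - 0) 0 rfl (by omega) [l]
      _ = l :: tsuf l idxs := by simp

theorem filterNew_nil_eq_dedup (l : List Int) : filterNew [] l = PySem.List.dedup l := by
  have h := dd_foldl_eq_append_filterNew l []
  rw [List.nil_append] at h
  rw [← h, dedup_eq_dd_foldl]

theorem generate_eq_final (l : List Int) : generate l = generate_alt l := by
  by_cases hl : l = []
  · subst hl; rfl
  · rw [generate_eq_dd, generate_alt_eq, if_neg hl]
    have hfx : ∀ a ∈ l, fidx l a < l.length ∧ l.getD (fidx l a) 0 = a := fun a ha => fidx_spec l a ha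
    have hmemsn : ∀ a ∈ PySem.List.dedup l, a ∈ l := fun a ha => (PySem.List.mem_dedup l a).mp ha
    set sn := PySem.List.dedup l with hsn
    set ks := sn.map (fidx l) with hks
    have hb : ∀ k ∈ ks, k < l.length := by
      intro k hk
      obtain ⟨a, ha, rfl⟩ := List.mem_map.mp hk
      exact (hfx a (hmemsn a ha)).1
    have hvals : ∀ k ∈ ks, ∀ k' ∈ ks, k ≠ k' → l.getD k 0 ≠ l.getD k' 0 := by
      intro k hk k' hk' hne
      obtain ⟨a, ha, rfl⟩ := List.mem_map.mp hk
      obtain ⟨a', ha', rfl⟩ := List.mem_map.mp hk'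
      rw [(hfx a (hmemsn a ha)).2, (hfx a' (hmemsn a' ha')).2]
      intro h
      exact hne (h ▸ rfl)
    have hn : ks.Nodup := by
      refine List.Nodup.map_on ?_ (PySem.List.nodup_dedup l)
      intro a ha a' ha' h
      have := (hfx a (hmemsn a ha)).2
      rw [h, (hfx a' (hmemsn a' ha')).2] at this
      exact this.symm
    -- Step 1: the outer flatMap over l collapses to a flatMap over the distinct values.
    rw [dd_flatMap_filterNew _ l [] [] (by simp), filterNew_nil_eq_dedup, ← hsn]
    -- Step 2: each inner block over l collapses to a block over the distinct values.
    rw [dd_foldl_flatMap_congr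
      (fun a => l.map (fun b => swp l (fidx l a) (fidx l b)))
      (fun a => sn.map (fun b => swp l (fidx l a) (fidx l b)))
      (by
        intro a acc
        simp only [List.map_eq_flatMap]
        rw [dd_flatMap_filterNew _ l [] acc (by simp), filterNew_nil_eq_dedup, ← hsn]) sn []]
    -- Step 3: pass from distinct values to their first-occurrence indices.
    have hstep3 : sn.flatMap (fun a => sn.map (fun b => swp l (fidx l a) (fidx l b)))
        = ks.flatMap (fun i => ks.map (swp l i)) := by
      rw [hks, List.flatMap_map]
      simp [List.map_map, Function.comp_def]
    rw [hstep3]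
    -- Step 4: the very first generated clone is the original list itself.
    obtain ⟨k0, ks', hks0⟩ : ∃ k0 ks', ks = k0 :: ks' := by
      have hsne : sn ≠ [] := by
        rcases l with - | ⟨x, l'⟩
        · exact absurd rfl hl
        · intro h
          have hx : x ∈ sn := (PySem.List.mem_dedup _ x).mpr (by simp)
          rw [h] at hx
          simp at hx
      rcases hq : ks with - | ⟨k0, ks'⟩
      · rw [hks] at hq
        exact absurd (List.map_eq_nil_iff.mp hq) hsne
      · exact ⟨k0, ks', rfl⟩
    have hk0 : k0 ∈ ks := by rw [hks0]; simp
    have hswp0 : swp l k0 k0 = l := swp_self l k0 (hb k0 hk0)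
    have hhead : ks.flatMap (fun i => ks.map (swp l i))
        = l :: (ks'.map (swp l k0) ++ ks'.flatMap (fun i => ks.map (swp l i))) := by
      rw [hks0, List.flatMap_cons, List.map_cons, hswp0]
      simp
    rw [hhead, List.foldl_cons]
    have hdd1 : dd ([] : List (List Int)) l = [l] := by simp [dd]
    have hddl : dd [l] l = [l] := by simp [dd]
    have hdd2 : List.foldl dd [l] (ks'.map (swp l k0) ++ ks'.flatMap (fun i => ks.map (swp l i)))
        = List.foldl dd (l :: rows l [] ks) (ks.flatMap (fun i => ks.map (swp l i))) := by
      simp only [rows]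
      rw [hks0, List.flatMap_cons, List.map_cons, hswp0, List.cons_append, List.foldl_cons, hddl]
    rw [hdd1, hdd2, main_blocks l ks hb hvals hn ks [] rfl]

-- ===== VERDICT (by name: the statement is the Claim_ definition above) =====
theorem generate_spec : Claim_equal_generate := by
  intro starting_list _
  unfold Spec_generate
  exact generate_eq_final starting_list
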